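-- pv_equiv track=rewrite | github.com/jiajunma/unipotentrepn | standalone.py | dpart2Wrepns_with_wp
-- ===== SOURCE A (Python) =====
-- def reg_part(part):
--     """Regularize partition: sort descending, remove zeros."""
--     return tuple(sorted((x for x in part if x > 0), reverse=True))
--
-- def _allsubsets(lst):
--     """Yield all subsets of lst as frozensets."""
--     n = len(lst)
--     for mask in range(1 << n):
--         yield frozenset(lst[j] for j in range(n) if mask & (1 << j))
--
-- def dpart2Wrepns_with_wp(dpart, rtype):
--     """
--     Compute W-representations labelled by ℘.
--
--     Returns dict: frozenset(PPidx subset) → bipartition (tauL, tauR).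
--     Reference: [BMSZb] Section 8.3, equation (8.9).
--     """
--     rows = list(reg_part(dpart))
--     a, res = divmod(len(rows), 2)
--     if rtype == 'M' and res == 1:
--         rows.append(0); a += 1
--     elif rtype == 'C' and res == 1:
--         rows.append(-1); a += 1
--     elif rtype == 'B' and res == 0:
--         rows.append(0)
--     elif rtype == 'D' and res == 0:
--         rows.append(-1)
--
--     if rtype in ('B', 'D'):
--         PPidx = [i for i in range(a)
--                  if rows[2 * i + 1] > rows[2 * i + 2] and rows[2 * i + 2] >= 0]
--     else:
--         PPidx = [i for i in range(a)
--                  if rows[2 * i] > rows[2 * i + 1] and rows[2 * i + 1] >= 0]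
--
--     result = {}
--     if rtype in ('B', 'M'):
--         if rtype == 'B':
--             otauL, otauR = [], [rows[0] // 2]
--             rows = rows[1:]
--         else:
--             otauL, otauR = [], []
--         for P in _allsubsets(PPidx):
--             tauL, tauR = [], []
--             for i in range(a):
--                 if i in P:
--                     tauL.append(rows[2 * i + 1] // 2)
--                     tauR.append(rows[2 * i] // 2)
--                 else:
--                     tauL.append(rows[2 * i] // 2)
--                     tauR.append(rows[2 * i + 1] // 2)
--             tau = (tuple(sorted([x for x in otauL + tauL if x > 0], reverse=True)),
--                    tuple(sorted([x for x in otauR + tauR if x > 0], reverse=True)))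
--             result[P] = tau
--
--     elif rtype in ('D', 'C'):
--         if rtype == 'D':
--             otauL, otauR = [(rows[0] + 1) // 2], []
--             rows = rows[1:]
--         else:
--             otauL, otauR = [], []
--         for P in _allsubsets(PPidx):
--             tauL, tauR = [], []
--             for i in range(a):
--                 if i in P:
--                     tauR.append((rows[2 * i + 1] - 1) // 2)
--                     tauL.append((rows[2 * i] + 1) // 2)
--                 else:
--                     tauR.append((rows[2 * i] - 1) // 2)
--                     tauL.append((rows[2 * i + 1] + 1) // 2)
--             tau = (tuple(sorted([x for x in otauL + tauL if x > 0], reverse=True)),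
--                    tuple(sorted([x for x in otauR + tauR if x > 0], reverse=True)))
--             result[P] = tau
--
--     return result
-- ===== SOURCE B (Python) =====
-- def _srt(xs):
--     return tuple(sorted((x for x in xs if x > 0), reverse=True))
--
-- def _pairvals(rtype, u, v):
--     """(defaultL, defaultR, swapL, swapR) contributed by the row pair (u, v)."""
--     if rtype == 'B' or rtype == 'M':
--         return (u // 2, v // 2, v // 2, u // 2)
--     return ((v + 1) // 2, (u - 1) // 2, (u + 1) // 2, (v - 1) // 2)
--
-- def dpart2Wrepns_with_wp(dpart, rtype):
--     """B: precompute the fixed base contributions plus (default, swapped) pairs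
--     for the varying indices only, then enumerate subsets by doubling recursion."""
--     rows = sorted((x for x in dpart if x > 0), reverse=True)
--     a, res = divmod(len(rows), 2)
--     if res == 1:
--         if rtype == 'M':
--             rows.append(0); a += 1
--         elif rtype == 'C':
--             rows.append(-1); a += 1
--     else:
--         if rtype == 'B':
--             rows.append(0)
--         elif rtype == 'D':
--             rows.append(-1)
--     if rtype not in ('B', 'C', 'D', 'M'):
--         return {}
--     body = rows[1:] if rtype in ('B', 'D') else rows
--     baseL = [(rows[0] + 1) // 2] if rtype == 'D' else []
--     baseR = [rows[0] // 2] if rtype == 'B' else []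
--     var = []   # (index, defaultL, defaultR, swapL, swapR) for the varying indices
--     for i in range(a):
--         u, v = body[2 * i], body[2 * i + 1]
--         dl, dr, sl, sr = _pairvals(rtype, u, v)
--         if u > v and v >= 0:
--             var.append((i, dl, dr, sl, sr))
--         else:
--             baseL.append(dl)
--             baseR.append(dr)
--
--     def build(vs):
--         if not vs:
--             return [((), (), ())]
--         x, dl, dr, sl, sr = vs[0]
--         out = []
--         for k, L, R in build(vs[1:]):
--             out.append((k, (dl,) + L, (dr,) + R))
--             out.append(((x,) + k, (sl,) + L, (sr,) + R))
--         return out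
--
--     return {frozenset(k): (_srt(baseL + list(L)), _srt(baseR + list(R)))
--             for k, L, R in build(var)}
-- ===== Notes on version B (the rewrite author's own statement) =====
-- stated objective: alternative
-- what changed: Instead of re-scanning all row pairs for every subset P, B precomputes once the fixed base contributions (otau seed plus every non-varying pair's default values) and a (default, swapped) value pair for each varying index, then enumerates the subsets by a doubling recursion over the varying indices only, appending per subset just the chosen values before the positive-filter-and-sort.
import Mathlib
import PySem

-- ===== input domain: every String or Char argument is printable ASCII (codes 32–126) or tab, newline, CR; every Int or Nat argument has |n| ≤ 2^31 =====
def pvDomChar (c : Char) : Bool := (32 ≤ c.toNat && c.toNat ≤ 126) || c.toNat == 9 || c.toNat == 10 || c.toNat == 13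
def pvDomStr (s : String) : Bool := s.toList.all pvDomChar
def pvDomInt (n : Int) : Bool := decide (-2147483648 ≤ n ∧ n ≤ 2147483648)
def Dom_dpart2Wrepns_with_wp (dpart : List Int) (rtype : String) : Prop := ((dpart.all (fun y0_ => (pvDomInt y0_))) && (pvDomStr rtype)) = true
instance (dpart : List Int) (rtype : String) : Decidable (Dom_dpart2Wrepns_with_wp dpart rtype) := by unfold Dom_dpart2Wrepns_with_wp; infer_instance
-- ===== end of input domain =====

-- B re-implements the per-subset work: the fixed base contributions are computed once and the
-- subsets are enumerated by a doubling recursion over the varying indices only (objective: alternative).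

-- ===== PORT A =====
-- sorted([x for x in xs if x > 0], reverse=True): reg_part in A, _srt in B (identical Python code)
def pvSrt (xs : List Int) : List Int :=
  PySem.List.sorted (xs.filter (fun x => decide (0 < x))) (fun x => x) true

-- rows[i]: every index either Python uses is in range on every input, so the default is never read
def pvGet (l : List Int) (i : Int) : Int := (PySem.List.pyGet? l i).getD 0

-- frozenset(PPidx[j] for j in range(n) if mask & (1 << j)): distinct elements, in j order
def pvMaskSubset (ppidx : List Int) (mask : Nat) : List Int :=
  (List.range ppidx.length).filterMap
    (fun j => if mask.testBit j then PySem.List.pyGet? ppidx (j : Int) else none)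

def dpart2Wrepns_with_wp (dpart : List Int) (rtype : String) : List (List Int × List Int × List Int) :=
  let rows0 := pvSrt dpart
  let a0 : Int := PySem.Int.floordiv (rows0.length : Int) 2
  let res : Int := PySem.Int.mod (rows0.length : Int) 2
  let st :=
    if rtype = "M" ∧ res = 1 then (rows0 ++ [0], a0 + 1)
    else if rtype = "C" ∧ res = 1 then (rows0 ++ [-1], a0 + 1)
    else if rtype = "B" ∧ res = 0 then (rows0 ++ [0], a0)
    else if rtype = "D" ∧ res = 0 then (rows0 ++ [-1], a0)
    else (rows0, a0)
  let rows := st.1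
  let a := st.2
  let PPidx : List Int :=
    if rtype = "B" ∨ rtype = "D" then
      (PySem.List.pyRange 0 a 1).filter
        (fun i => decide (pvGet rows (2*i+1) > pvGet rows (2*i+2) ∧ pvGet rows (2*i+2) ≥ 0))
    else
      (PySem.List.pyRange 0 a 1).filter
        (fun i => decide (pvGet rows (2*i) > pvGet rows (2*i+1) ∧ pvGet rows (2*i+1) ≥ 0))
  if rtype = "B" ∨ rtype = "M" then
    let otauL : List Int := []
    let otauR : List Int := if rtype = "B" then [PySem.Int.floordiv (pvGet rows 0) 2] else []
    let rows1 := if rtype = "B" then PySem.List.slice rows (some 1) none else rows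
    (List.range (2 ^ PPidx.length)).map (fun mask =>
      let P := pvMaskSubset PPidx mask
      let t := (PySem.List.pyRange 0 a 1).foldl
        (fun (acc : List Int × List Int) i =>
          if i ∈ P then
            (acc.1 ++ [PySem.Int.floordiv (pvGet rows1 (2*i+1)) 2],
             acc.2 ++ [PySem.Int.floordiv (pvGet rows1 (2*i)) 2])
          else
            (acc.1 ++ [PySem.Int.floordiv (pvGet rows1 (2*i)) 2],
             acc.2 ++ [PySem.Int.floordiv (pvGet rows1 (2*i+1)) 2])) ([], [])
      (P, pvSrt (otauL ++ t.1), pvSrt (otauR ++ t.2)))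
  else if rtype = "D" ∨ rtype = "C" then
    let otauL : List Int := if rtype = "D" then [PySem.Int.floordiv (pvGet rows 0 + 1) 2] else []
    let otauR : List Int := []
    let rows1 := if rtype = "D" then PySem.List.slice rows (some 1) none else rows
    (List.range (2 ^ PPidx.length)).map (fun mask =>
      let P := pvMaskSubset PPidx mask
      let t := (PySem.List.pyRange 0 a 1).foldl
        (fun (acc : List Int × List Int) i =>
          if i ∈ P then
            (acc.1 ++ [PySem.Int.floordiv (pvGet rows1 (2*i) + 1) 2],
             acc.2 ++ [PySem.Int.floordiv (pvGet rows1 (2*i+1) - 1) 2])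
          else
            (acc.1 ++ [PySem.Int.floordiv (pvGet rows1 (2*i+1) + 1) 2],
             acc.2 ++ [PySem.Int.floordiv (pvGet rows1 (2*i) - 1) 2])) ([], [])
      (P, pvSrt (otauL ++ t.1), pvSrt (otauR ++ t.2)))
  else []

-- ===== PORT B =====
-- _pairvals(rtype, u, v): (defaultL, defaultR, swapL, swapR) contributed by the row pair (u, v)
def pvPairvals (rtype : String) (u v : Int) : Int × Int × Int × Int :=
  if rtype = "B" ∨ rtype = "M" then
    (PySem.Int.floordiv u 2, PySem.Int.floordiv v 2,
     PySem.Int.floordiv v 2, PySem.Int.floordiv u 2)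
  else
    (PySem.Int.floordiv (v+1) 2, PySem.Int.floordiv (u-1) 2,
     PySem.Int.floordiv (u+1) 2, PySem.Int.floordiv (v-1) 2)

-- build(vs): doubling recursion producing (key, extraL, extraR) per subset, low bit first
def pvBuild : List (Int × Int × Int × Int × Int) → List (List Int × List Int × List Int)
  | [] => [([], [], [])]
  | (x, dl, dr, sl, sr) :: rest =>
    (pvBuild rest).flatMap (fun t =>
      [(t.1, dl :: t.2.1, dr :: t.2.2), (x :: t.1, sl :: t.2.1, sr :: t.2.2)])

def dpart2Wrepns_with_wp_alt (dpart : List Int) (rtype : String) : List (List Int × List Int × List Int) :=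
  let rows0 := pvSrt dpart
  let a0 : Int := PySem.Int.floordiv (rows0.length : Int) 2
  let res : Int := PySem.Int.mod (rows0.length : Int) 2
  let st :=
    if res = 1 then
      if rtype = "M" then (rows0 ++ [0], a0 + 1)
      else if rtype = "C" then (rows0 ++ [-1], a0 + 1)
      else (rows0, a0)
    else
      if rtype = "B" then (rows0 ++ [0], a0)
      else if rtype = "D" then (rows0 ++ [-1], a0)
      else (rows0, a0)
  let rows := st.1
  let a := st.2
  if rtype = "B" ∨ rtype = "C" ∨ rtype = "D" ∨ rtype = "M" then
    let body := if rtype = "B" ∨ rtype = "D" then PySem.List.slice rows (some 1) none else rows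
    let baseL0 : List Int := if rtype = "D" then [PySem.Int.floordiv (pvGet rows 0 + 1) 2] else []
    let baseR0 : List Int := if rtype = "B" then [PySem.Int.floordiv (pvGet rows 0) 2] else []
    let acc := (PySem.List.pyRange 0 a 1).foldl
      (fun (acc : List (Int × Int × Int × Int × Int) × List Int × List Int) i =>
        let u := pvGet body (2*i)
        let v := pvGet body (2*i+1)
        let c := pvPairvals rtype u v
        if u > v ∧ v ≥ 0 then
          (acc.1 ++ [(i, c.1, c.2.1, c.2.2.1, c.2.2.2)], acc.2.1, acc.2.2)
        else
          (acc.1, acc.2.1 ++ [c.1], acc.2.2 ++ [c.2.1])) ([], baseL0, baseR0)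
    (pvBuild acc.1).map (fun t => (t.1, pvSrt (acc.2.1 ++ t.2.1), pvSrt (acc.2.2 ++ t.2.2)))
  else []

-- ===== PRECONDITION & SPEC =====
def Spec_dpart2Wrepns_with_wp (dpart : List Int) (rtype : String) (out : List (List Int × List Int × List Int)) : Prop := out = dpart2Wrepns_with_wp_alt dpart rtype
instance (dpart : List Int) (rtype : String) (out : List (List Int × List Int × List Int)) : Decidable (Spec_dpart2Wrepns_with_wp dpart rtype out) := by unfold Spec_dpart2Wrepns_with_wp; infer_instance

-- ===== CLAIM (what is proved, stated in full; the proofs are below) =====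
def Claim_equal_dpart2Wrepns_with_wp : Prop := ∀ (dpart : List Int) (rtype : String), Dom_dpart2Wrepns_with_wp dpart rtype → Spec_dpart2Wrepns_with_wp dpart rtype (dpart2Wrepns_with_wp dpart rtype)

-- ===== LEMMAS AND PROOFS =====
theorem pvSrt_perm {l1 l2 : List Int} (h : l1.Perm l2) : pvSrt l1 = pvSrt l2 := by
  unfold pvSrt
  have hf : (l1.filter (fun x => decide (0 < x))).Perm (l2.filter (fun x => decide (0 < x))) :=
    h.filter _
  apply PySem.List.eq_of_perm_of_pairwise_le_of_injective (key := fun x : Int => -x)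
  · exact neg_injective
  · exact ((PySem.List.sorted_perm _ _ _).trans hf).trans (PySem.List.sorted_perm _ _ _).symm
  · exact (PySem.List.sorted_pairwise_rev _ _).imp (fun {a b} hab => by simpa using hab)
  · exact (PySem.List.sorted_pairwise_rev _ _).imp (fun {a b} hab => by simpa using hab)

theorem pvRange_two_mul (n : Nat) :
    List.range (2 * n) = (List.range n).flatMap (fun m => [2*m, 2*m+1]) := by
  induction n with
  | zero => simp
  | succ k ih =>
    have h2 : 2 * (k+1) = (2*k) + 1 + 1 := by ring
    rw [h2, List.range_succ, List.range_succ, List.range_succ, List.flatMap_append, ← ih]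
    simp

def pvMsel : List Int → Nat → List Int
  | [], _ => []
  | x :: r, m => if m % 2 = 1 then x :: pvMsel r (m / 2) else pvMsel r (m / 2)

theorem pvMsel_subset (xs : List Int) (m : Nat) : ∀ y ∈ pvMsel xs m, y ∈ xs := by
  induction xs generalizing m with
  | nil => simp [pvMsel]
  | cons x r ih =>
    intro y hy
    unfold pvMsel at hy
    by_cases hm : m % 2 = 1 <;> simp [hm] at hy
    · rcases hy with rfl | hy
      · exact List.mem_cons_self
      · exact List.mem_cons_of_mem _ (ih _ _ hy)
    · exact List.mem_cons_of_mem _ (ih _ _ hy)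

theorem pvFoldl_pair_append (l : List Int) (f g : Int → Int) (p q : List Int) :
    l.foldl (fun acc i => (acc.1 ++ [f i], acc.2 ++ [g i])) (p, q)
      = (p ++ l.map f, q ++ l.map g) := by
  induction l generalizing p q with
  | nil => simp
  | cons x t ih => simp [ih]

theorem pvFoldl_triple_append (l : List Int) (c : Int → Bool)
    (f5 : Int → Int × Int × Int × Int × Int) (dl dr : Int → Int)
    (V : List (Int × Int × Int × Int × Int)) (L R : List Int) :
    l.foldl (fun acc i =>
        if c i then (acc.1 ++ [f5 i], acc.2.1, acc.2.2)
        else (acc.1, acc.2.1 ++ [dl i], acc.2.2 ++ [dr i])) (V, L, R)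
      = (V ++ (l.filter c).map f5,
         L ++ (l.filter (fun i => !c i)).map dl,
         R ++ (l.filter (fun i => !c i)).map dr) := by
  induction l generalizing V L R with
  | nil => simp
  | cons x t ih => cases hc : c x <;> simp [hc, ih]

theorem pvMaskSubset_eq_msel (xs : List Int) (mask : Nat) :
    pvMaskSubset xs mask = pvMsel xs mask := by
  induction xs generalizing mask with
  | nil => simp [pvMaskSubset, pvMsel]
  | cons x r ih =>
    unfold pvMaskSubset pvMsel
    rw [List.length_cons, List.range_succ_eq_map, List.filterMap_cons, List.filterMap_map]
    have hbit0 : mask.testBit 0 = decide (mask % 2 = 1) := Nat.testBit_zero mask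
    have hfun : ∀ j : Nat,
        ((fun j => if mask.testBit j then PySem.List.pyGet? (x :: r) (j : Int) else none) ∘ Nat.succ) j
          = (fun j => if (mask / 2).testBit j then PySem.List.pyGet? r (j : Int) else none) j := by
      intro j
      simp only [Function.comp]
      rw [Nat.testBit_succ]
      congr 1
      rw [PySem.List.pyGet?_natCast, PySem.List.pyGet?_natCast]
      simp
    rw [List.filterMap_congr (fun j _ => hfun j)]
    by_cases hm : mask % 2 = 1
    · simp only [hbit0, hm, decide_true, if_true]
      rw [PySem.List.pyGet?_natCast]
      have := ih (mask / 2)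
      simp [pvMaskSubset] at this
      simp [this]
    · simp only [hbit0, hm, decide_false, if_false]
      have := ih (mask / 2)
      simp [pvMaskSubset] at this
      simp [this]

def pvPick : List (Int × Int × Int × Int × Int) → Nat → List Int × List Int × List Int
  | [], _ => ([], [], [])
  | (x, dl, dr, sl, sr) :: rest, m =>
    let t := pvPick rest (m / 2)
    if m % 2 = 1 then (x :: t.1, sl :: t.2.1, sr :: t.2.2) else (t.1, dl :: t.2.1, dr :: t.2.2)

theorem pvBuild_eq_map_pick (vs : List (Int × Int × Int × Int × Int)) :
    pvBuild vs = (List.range (2 ^ vs.length)).map (pvPick vs) := by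
  induction vs with
  | nil => simp [pvBuild, pvPick]
  | cons v rest ih =>
    obtain ⟨x, dl, dr, sl, sr⟩ := v
    have hp : 2 ^ (rest.length + 1) = 2 * 2 ^ rest.length := by ring
    rw [List.length_cons, hp, pvRange_two_mul, List.map_flatMap]
    show (pvBuild rest).flatMap _ = _
    rw [ih, List.flatMap_map]
    apply List.flatMap_congr
    intro m _
    have he : (2*m) % 2 = 0 := by omega
    have ho : (2*m+1) % 2 = 1 := by omega
    have he2 : (2*m) / 2 = m := by omega
    have ho2 : (2*m+1) / 2 = m := by omega
    simp [pvPick, he, ho, he2, ho2]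

def pvTup (dl dr sl sr : Int → Int) (i : Int) : Int × Int × Int × Int × Int :=
  (i, dl i, dr i, sl i, sr i)

theorem pvPick_spec (dl dr sl sr : Int → Int) (xs : List Int) (hx : xs.Nodup) (m : Nat) :
    (pvPick (xs.map (pvTup dl dr sl sr)) m).1 = pvMsel xs m ∧
    (pvPick (xs.map (pvTup dl dr sl sr)) m).2.1
      = xs.map (fun i => if i ∈ pvMsel xs m then sl i else dl i) ∧
    (pvPick (xs.map (pvTup dl dr sl sr)) m).2.2
      = xs.map (fun i => if i ∈ pvMsel xs m then sr i else dr i) := by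
  induction xs generalizing m with
  | nil => simp [pvPick, pvMsel]
  | cons x r ih =>
    rw [List.nodup_cons] at hx
    obtain ⟨hxr, hr⟩ := hx
    obtain ⟨ih1, ih2, ih3⟩ := ih hr (m / 2)
    have htail : ∀ (f g : Int → Int),
        r.map (fun i => if i ∈ pvMsel (x :: r) m then f i else g i)
          = r.map (fun i => if i ∈ pvMsel r (m / 2) then f i else g i) := by
      intro f g
      apply List.map_congr_left
      intro i hi
      have hix : i ≠ x := fun h => hxr (h ▸ hi)
      have hcons : pvMsel (x :: r) m
          = if m % 2 = 1 then x :: pvMsel r (m / 2) else pvMsel r (m / 2) := rfl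
      rw [hcons]
      by_cases hm : m % 2 = 1 <;> simp [hm, hix]
    have hxmem : x ∈ pvMsel (x :: r) m ↔ m % 2 = 1 := by
      constructor
      · intro h
        by_contra hm
        have hcons : pvMsel (x :: r) m
            = if m % 2 = 1 then x :: pvMsel r (m / 2) else pvMsel r (m / 2) := rfl
        rw [hcons] at h
        simp [hm] at h
        exact hxr (pvMsel_subset _ _ _ h)
      · intro hm
        have hcons : pvMsel (x :: r) m
            = if m % 2 = 1 then x :: pvMsel r (m / 2) else pvMsel r (m / 2) := rfl
        rw [hcons]; simp [hm]
    have hcons : pvMsel (x :: r) m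
        = if m % 2 = 1 then x :: pvMsel r (m / 2) else pvMsel r (m / 2) := rfl
    have hpick : pvPick (List.map (pvTup dl dr sl sr) (x :: r)) m
        = (if m % 2 = 1
            then (x :: (pvPick (List.map (pvTup dl dr sl sr) r) (m / 2)).1,
                  sl x :: (pvPick (List.map (pvTup dl dr sl sr) r) (m / 2)).2.1,
                  sr x :: (pvPick (List.map (pvTup dl dr sl sr) r) (m / 2)).2.2)
            else ((pvPick (List.map (pvTup dl dr sl sr) r) (m / 2)).1,
                  dl x :: (pvPick (List.map (pvTup dl dr sl sr) r) (m / 2)).2.1,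
                  dr x :: (pvPick (List.map (pvTup dl dr sl sr) r) (m / 2)).2.2)) := rfl
    by_cases hm : m % 2 = 1
    · rw [hpick]
      simp only [hm, if_true, ih1, ih2, ih3]
      refine ⟨by rw [hcons]; simp [hm], ?_, ?_⟩
      · simp only [List.map_cons, htail sl dl, if_pos (hxmem.mpr hm)]
      · simp only [List.map_cons, htail sr dr, if_pos (hxmem.mpr hm)]
    · rw [hpick]
      simp only [hm, if_false, ih1, ih2, ih3]
      have hxn : x ∉ pvMsel (x :: r) m := fun h => hm (hxmem.mp h)
      refine ⟨by rw [hcons]; simp [hm], ?_, ?_⟩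
      · simp only [List.map_cons, htail sl dl, if_neg hxn]
      · simp only [List.map_cons, htail sr dr, if_neg hxn]

theorem pvCore (l : List Int) (hl : l.Nodup) (cond : Int → Bool)
    (dl dr sl sr : Int → Int) (oL oR : List Int) :
    (List.range (2 ^ ((l.filter cond).length))).map (fun mask =>
      (pvMaskSubset (l.filter cond) mask,
       pvSrt (oL ++ l.map (fun i => if i ∈ pvMaskSubset (l.filter cond) mask then sl i else dl i)),
       pvSrt (oR ++ l.map (fun i => if i ∈ pvMaskSubset (l.filter cond) mask then sr i else dr i))))
    = (pvBuild ((l.filter cond).map (pvTup dl dr sl sr))).map (fun t =>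
        (t.1, pvSrt ((oL ++ (l.filter (fun i => !cond i)).map dl) ++ t.2.1),
              pvSrt ((oR ++ (l.filter (fun i => !cond i)).map dr) ++ t.2.2))) := by
  have hnod : (l.filter cond).Nodup := hl.filter _
  rw [pvBuild_eq_map_pick, List.length_map, List.map_map]
  apply List.map_congr_left
  intro m _
  obtain ⟨h1, h2, h3⟩ := pvPick_spec dl dr sl sr (l.filter cond) hnod m
  simp only [Function.comp]
  rw [pvMaskSubset_eq_msel, h1, h2, h3]
  have key : ∀ (o : List Int) (s d : Int → Int),
      (o ++ l.map (fun i => if i ∈ pvMsel (l.filter cond) m then s i else d i)).Perm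
        ((o ++ (l.filter (fun i => !cond i)).map d)
          ++ (l.filter cond).map (fun i => if i ∈ pvMsel (l.filter cond) m then s i else d i)) := by
    intro o s d
    set f := fun i => if i ∈ pvMsel (l.filter cond) m then s i else d i with hf
    have hdef : (l.filter (fun i => !cond i)).map f = (l.filter (fun i => !cond i)).map d := by
      apply List.map_congr_left
      intro i hi
      rw [List.mem_filter] at hi
      have hni : i ∉ pvMsel (l.filter cond) m := by
        intro hmem
        have h' := pvMsel_subset _ _ _ hmem
        rw [List.mem_filter] at h'
        simp [h'.2] at hi
      simp [hf, hni]
    have hsplit : (l.map f).Perm ((l.filter cond).map f ++ (l.filter (fun i => !cond i)).map f) :=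
      (List.Perm.map f (List.filter_append_perm cond l)).symm.trans (List.Perm.of_eq (List.map_append ..))
    have h4 : (o ++ l.map f).Perm
        (o ++ ((l.filter (fun i => !cond i)).map d ++ (l.filter cond).map f)) :=
      List.Perm.append_left o
        (hsplit.trans ((List.perm_append_comm).trans (by rw [hdef])))
    exact h4.trans (List.Perm.of_eq (by rw [List.append_assoc]))
  exact Prod.ext rfl (Prod.ext (pvSrt_perm (key oL sl dl)) (pvSrt_perm (key oR sr dr)))

theorem pvGet_tail (l : List Int) (j : Int) (hj : 0 ≤ j) :
    pvGet (PySem.List.slice l (some 1) none) j = pvGet l (j + 1) := by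
  rw [PySem.List.slice_from_one]
  obtain ⟨n, rfl⟩ := Int.eq_ofNat_of_zero_le hj
  cases l with
  | nil =>
    unfold pvGet
    rw [PySem.List.pyGet?_of_nonneg (h := by omega), PySem.List.pyGet?_of_nonneg (h := by omega)]
    simp
  | cons x t =>
    unfold pvGet
    rw [PySem.List.pyGet?_cons_succ]
    simp

def pvStA (rtype : String) (rows0 : List Int) (a0 res : Int) : List Int × Int :=
  if rtype = "M" ∧ res = 1 then (rows0 ++ [0], a0 + 1)
  else if rtype = "C" ∧ res = 1 then (rows0 ++ [-1], a0 + 1)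
  else if rtype = "B" ∧ res = 0 then (rows0 ++ [0], a0)
  else if rtype = "D" ∧ res = 0 then (rows0 ++ [-1], a0)
  else (rows0, a0)

def pvStB (rtype : String) (rows0 : List Int) (a0 res : Int) : List Int × Int :=
  if res = 1 then
    if rtype = "M" then (rows0 ++ [0], a0 + 1)
    else if rtype = "C" then (rows0 ++ [-1], a0 + 1)
    else (rows0, a0)
  else
    if rtype = "B" then (rows0 ++ [0], a0)
    else if rtype = "D" then (rows0 ++ [-1], a0)
    else (rows0, a0)

def pvABody (rtype : String) (p : List Int × Int) : List (List Int × List Int × List Int) :=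
  let rows := p.1
  let a := p.2
  let PPidx : List Int :=
    if rtype = "B" ∨ rtype = "D" then
      (PySem.List.pyRange 0 a 1).filter
        (fun i => decide (pvGet rows (2*i+1) > pvGet rows (2*i+2) ∧ pvGet rows (2*i+2) ≥ 0))
    else
      (PySem.List.pyRange 0 a 1).filter
        (fun i => decide (pvGet rows (2*i) > pvGet rows (2*i+1) ∧ pvGet rows (2*i+1) ≥ 0))
  if rtype = "B" ∨ rtype = "M" then
    let otauL : List Int := []
    let otauR : List Int := if rtype = "B" then [PySem.Int.floordiv (pvGet rows 0) 2] else []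
    let rows1 := if rtype = "B" then PySem.List.slice rows (some 1) none else rows
    (List.range (2 ^ PPidx.length)).map (fun mask =>
      let P := pvMaskSubset PPidx mask
      let t := (PySem.List.pyRange 0 a 1).foldl
        (fun (acc : List Int × List Int) i =>
          if i ∈ P then
            (acc.1 ++ [PySem.Int.floordiv (pvGet rows1 (2*i+1)) 2],
             acc.2 ++ [PySem.Int.floordiv (pvGet rows1 (2*i)) 2])
          else
            (acc.1 ++ [PySem.Int.floordiv (pvGet rows1 (2*i)) 2],
             acc.2 ++ [PySem.Int.floordiv (pvGet rows1 (2*i+1)) 2])) ([], [])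
      (P, pvSrt (otauL ++ t.1), pvSrt (otauR ++ t.2)))
  else if rtype = "D" ∨ rtype = "C" then
    let otauL : List Int := if rtype = "D" then [PySem.Int.floordiv (pvGet rows 0 + 1) 2] else []
    let otauR : List Int := []
    let rows1 := if rtype = "D" then PySem.List.slice rows (some 1) none else rows
    (List.range (2 ^ PPidx.length)).map (fun mask =>
      let P := pvMaskSubset PPidx mask
      let t := (PySem.List.pyRange 0 a 1).foldl
        (fun (acc : List Int × List Int) i =>
          if i ∈ P then
            (acc.1 ++ [PySem.Int.floordiv (pvGet rows1 (2*i) + 1) 2],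
             acc.2 ++ [PySem.Int.floordiv (pvGet rows1 (2*i+1) - 1) 2])
          else
            (acc.1 ++ [PySem.Int.floordiv (pvGet rows1 (2*i+1) + 1) 2],
             acc.2 ++ [PySem.Int.floordiv (pvGet rows1 (2*i) - 1) 2])) ([], [])
      (P, pvSrt (otauL ++ t.1), pvSrt (otauR ++ t.2)))
  else []

def pvBBody (rtype : String) (p : List Int × Int) : List (List Int × List Int × List Int) :=
  let rows := p.1
  let a := p.2
  if rtype = "B" ∨ rtype = "C" ∨ rtype = "D" ∨ rtype = "M" then
    let body := if rtype = "B" ∨ rtype = "D" then PySem.List.slice rows (some 1) none else rows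
    let baseL0 : List Int := if rtype = "D" then [PySem.Int.floordiv (pvGet rows 0 + 1) 2] else []
    let baseR0 : List Int := if rtype = "B" then [PySem.Int.floordiv (pvGet rows 0) 2] else []
    let acc := (PySem.List.pyRange 0 a 1).foldl
      (fun (acc : List (Int × Int × Int × Int × Int) × List Int × List Int) i =>
        let u := pvGet body (2*i)
        let v := pvGet body (2*i+1)
        let c := pvPairvals rtype u v
        if u > v ∧ v ≥ 0 then
          (acc.1 ++ [(i, c.1, c.2.1, c.2.2.1, c.2.2.2)], acc.2.1, acc.2.2)
        else
          (acc.1, acc.2.1 ++ [c.1], acc.2.2 ++ [c.2.1])) ([], baseL0, baseR0)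
    (pvBuild acc.1).map (fun t => (t.1, pvSrt (acc.2.1 ++ t.2.1), pvSrt (acc.2.2 ++ t.2.2)))
  else []

theorem pvA_split (dpart : List Int) (rtype : String) :
    dpart2Wrepns_with_wp dpart rtype
      = pvABody rtype (pvStA rtype (pvSrt dpart)
          (PySem.Int.floordiv ((pvSrt dpart).length : Int) 2)
          (PySem.Int.mod ((pvSrt dpart).length : Int) 2)) := rfl

theorem pvB_split (dpart : List Int) (rtype : String) :
    dpart2Wrepns_with_wp_alt dpart rtype
      = pvBBody rtype (pvStB rtype (pvSrt dpart)
          (PySem.Int.floordiv ((pvSrt dpart).length : Int) 2)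
          (PySem.Int.mod ((pvSrt dpart).length : Int) 2)) := rfl

theorem pvSt_eq (rtype : String) (rows0 : List Int) (a0 res : Int) (h : res = 0 ∨ res = 1) :
    pvStA rtype rows0 a0 res = pvStB rtype rows0 a0 res := by
  unfold pvStA pvStB
  rcases h with rfl | rfl <;>
    by_cases hM : rtype = "M" <;> by_cases hC : rtype = "C" <;>
    by_cases hB : rtype = "B" <;> by_cases hD : rtype = "D" <;>
    simp_all

theorem pvBody_B (p : List Int × Int) : pvABody "B" p = pvBBody "B" p := by
  obtain ⟨rows, a⟩ := p
  unfold pvABody pvBBody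
  simp only [String.reduceEq, or_false, if_true, if_false, pvPairvals]
  have hfilt : (PySem.List.pyRange 0 a 1).filter
      (fun i => decide (pvGet rows (2*i+1) > pvGet rows (2*i+2) ∧ pvGet rows (2*i+2) ≥ 0))
      = (PySem.List.pyRange 0 a 1).filter
        (fun i => decide (pvGet (PySem.List.slice rows (some 1) none) (2*i)
            > pvGet (PySem.List.slice rows (some 1) none) (2*i+1)
          ∧ pvGet (PySem.List.slice rows (some 1) none) (2*i+1) ≥ 0)) := by
    apply List.filter_congr
    intro i hi
    have hi0 : 0 ≤ i := (PySem.List.mem_pyRange_one.mp hi).1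
    rw [pvGet_tail rows (2*i) (by omega), pvGet_tail rows (2*i+1) (by omega)]
    have e1 : 2*i + 1 + 1 = 2*i + 2 := by ring
    rw [e1]
  rw [hfilt]
  have hfA : ∀ P : List Int,
      (fun (acc : List Int × List Int) i =>
        if i ∈ P then
          (acc.1 ++ [PySem.Int.floordiv (pvGet (PySem.List.slice rows (some 1) none) (2*i+1)) 2],
           acc.2 ++ [PySem.Int.floordiv (pvGet (PySem.List.slice rows (some 1) none) (2*i)) 2])
        else
          (acc.1 ++ [PySem.Int.floordiv (pvGet (PySem.List.slice rows (some 1) none) (2*i)) 2],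
           acc.2 ++ [PySem.Int.floordiv (pvGet (PySem.List.slice rows (some 1) none) (2*i+1)) 2]))
      = fun acc i =>
          (acc.1 ++ [if i ∈ P
              then PySem.Int.floordiv (pvGet (PySem.List.slice rows (some 1) none) (2*i+1)) 2
              else PySem.Int.floordiv (pvGet (PySem.List.slice rows (some 1) none) (2*i)) 2],
           acc.2 ++ [if i ∈ P
              then PySem.Int.floordiv (pvGet (PySem.List.slice rows (some 1) none) (2*i)) 2
              else PySem.Int.floordiv (pvGet (PySem.List.slice rows (some 1) none) (2*i+1)) 2]) := by
    intro P; funext acc i; by_cases h : i ∈ P <;> simp [h]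
  simp only [hfA, pvFoldl_pair_append]
  have hfB :
      (fun (acc : List (Int × Int × Int × Int × Int) × List Int × List Int) i =>
        if pvGet (PySem.List.slice rows (some 1) none) (2*i)
              > pvGet (PySem.List.slice rows (some 1) none) (2*i+1)
            ∧ pvGet (PySem.List.slice rows (some 1) none) (2*i+1) ≥ 0 then
          (acc.1 ++ [(i, PySem.Int.floordiv (pvGet (PySem.List.slice rows (some 1) none) (2*i)) 2,
                      PySem.Int.floordiv (pvGet (PySem.List.slice rows (some 1) none) (2*i+1)) 2,
                      PySem.Int.floordiv (pvGet (PySem.List.slice rows (some 1) none) (2*i+1)) 2,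
                      PySem.Int.floordiv (pvGet (PySem.List.slice rows (some 1) none) (2*i)) 2)],
           acc.2.1, acc.2.2)
        else
          (acc.1, acc.2.1 ++ [PySem.Int.floordiv (pvGet (PySem.List.slice rows (some 1) none) (2*i)) 2],
           acc.2.2 ++ [PySem.Int.floordiv (pvGet (PySem.List.slice rows (some 1) none) (2*i+1)) 2]))
      = fun acc i =>
        if (fun i => decide (pvGet (PySem.List.slice rows (some 1) none) (2*i)
              > pvGet (PySem.List.slice rows (some 1) none) (2*i+1)
            ∧ pvGet (PySem.List.slice rows (some 1) none) (2*i+1) ≥ 0)) i then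
          (acc.1 ++ [pvTup
              (fun i => PySem.Int.floordiv (pvGet (PySem.List.slice rows (some 1) none) (2*i)) 2)
              (fun i => PySem.Int.floordiv (pvGet (PySem.List.slice rows (some 1) none) (2*i+1)) 2)
              (fun i => PySem.Int.floordiv (pvGet (PySem.List.slice rows (some 1) none) (2*i+1)) 2)
              (fun i => PySem.Int.floordiv (pvGet (PySem.List.slice rows (some 1) none) (2*i)) 2) i],
           acc.2.1, acc.2.2)
        else
          (acc.1, acc.2.1 ++ [PySem.Int.floordiv (pvGet (PySem.List.slice rows (some 1) none) (2*i)) 2],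
           acc.2.2 ++ [PySem.Int.floordiv (pvGet (PySem.List.slice rows (some 1) none) (2*i+1)) 2]) := by
    funext acc i
    by_cases h : pvGet (PySem.List.slice rows (some 1) none) (2*i)
          > pvGet (PySem.List.slice rows (some 1) none) (2*i+1)
        ∧ pvGet (PySem.List.slice rows (some 1) none) (2*i+1) ≥ 0 <;>
      simp [h, pvTup]
  rw [hfB]
  rw [pvFoldl_triple_append]
  have hc := pvCore (PySem.List.pyRange 0 a 1) (PySem.List.nodup_pyRange_one 0 a)
    (fun i => decide (pvGet (PySem.List.slice rows (some 1) none) (2*i)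
        > pvGet (PySem.List.slice rows (some 1) none) (2*i+1)
      ∧ pvGet (PySem.List.slice rows (some 1) none) (2*i+1) ≥ 0))
    (fun i => PySem.Int.floordiv (pvGet (PySem.List.slice rows (some 1) none) (2*i)) 2)
    (fun i => PySem.Int.floordiv (pvGet (PySem.List.slice rows (some 1) none) (2*i+1)) 2)
    (fun i => PySem.Int.floordiv (pvGet (PySem.List.slice rows (some 1) none) (2*i+1)) 2)
    (fun i => PySem.Int.floordiv (pvGet (PySem.List.slice rows (some 1) none) (2*i)) 2)
    [] [PySem.Int.floordiv (pvGet rows 0) 2]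
  simp only [List.nil_append] at hc ⊢
  exact hc

theorem pvBody_M (p : List Int × Int) : pvABody "M" p = pvBBody "M" p := by
  obtain ⟨rows, a⟩ := p
  unfold pvABody pvBBody
  simp only [String.reduceEq, or_false, or_true, if_true, if_false, pvPairvals]
  have hfA : ∀ P : List Int,
      (fun (acc : List Int × List Int) i =>
        if i ∈ P then (acc.1 ++ [PySem.Int.floordiv (pvGet rows (2*i+1)) 2], acc.2 ++ [PySem.Int.floordiv (pvGet rows (2*i)) 2])
        else (acc.1 ++ [PySem.Int.floordiv (pvGet rows (2*i)) 2], acc.2 ++ [PySem.Int.floordiv (pvGet rows (2*i+1)) 2]))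
      = fun acc i =>
          (acc.1 ++ [if i ∈ P then PySem.Int.floordiv (pvGet rows (2*i+1)) 2 else PySem.Int.floordiv (pvGet rows (2*i)) 2],
           acc.2 ++ [if i ∈ P then PySem.Int.floordiv (pvGet rows (2*i)) 2 else PySem.Int.floordiv (pvGet rows (2*i+1)) 2]) := by
    intro P; funext acc i; by_cases h : i ∈ P <;> simp [h]
  simp only [hfA, pvFoldl_pair_append]
  have hfB :
      (fun (acc : List (Int × Int × Int × Int × Int) × List Int × List Int) i =>
        if pvGet (rows) (2*i) > pvGet (rows) (2*i+1) ∧ pvGet (rows) (2*i+1) ≥ 0 then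
          (acc.1 ++ [(i, PySem.Int.floordiv (pvGet rows (2*i)) 2, PySem.Int.floordiv (pvGet rows (2*i+1)) 2, PySem.Int.floordiv (pvGet rows (2*i+1)) 2, PySem.Int.floordiv (pvGet rows (2*i)) 2)], acc.2.1, acc.2.2)
        else
          (acc.1, acc.2.1 ++ [PySem.Int.floordiv (pvGet rows (2*i)) 2], acc.2.2 ++ [PySem.Int.floordiv (pvGet rows (2*i+1)) 2]))
      = fun acc i =>
        if (fun i => decide (pvGet rows (2*i) > pvGet rows (2*i+1) ∧ pvGet rows (2*i+1) ≥ 0)) i then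
          (acc.1 ++ [pvTup (fun i => PySem.Int.floordiv (pvGet rows (2*i)) 2) (fun i => PySem.Int.floordiv (pvGet rows (2*i+1)) 2) (fun i => PySem.Int.floordiv (pvGet rows (2*i+1)) 2) (fun i => PySem.Int.floordiv (pvGet rows (2*i)) 2) i],
           acc.2.1, acc.2.2)
        else
          (acc.1, acc.2.1 ++ [PySem.Int.floordiv (pvGet rows (2*i)) 2], acc.2.2 ++ [PySem.Int.floordiv (pvGet rows (2*i+1)) 2]) := by
    funext acc i
    by_cases h : pvGet (rows) (2*i) > pvGet (rows) (2*i+1) ∧ pvGet (rows) (2*i+1) ≥ 0 <;>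
      simp [h, pvTup]
  rw [hfB]
  rw [pvFoldl_triple_append]
  have hc := pvCore (PySem.List.pyRange 0 a 1) (PySem.List.nodup_pyRange_one 0 a)
    (fun i => decide (pvGet rows (2*i) > pvGet rows (2*i+1) ∧ pvGet rows (2*i+1) ≥ 0))
    (fun i => PySem.Int.floordiv (pvGet rows (2*i)) 2) (fun i => PySem.Int.floordiv (pvGet rows (2*i+1)) 2) (fun i => PySem.Int.floordiv (pvGet rows (2*i+1)) 2) (fun i => PySem.Int.floordiv (pvGet rows (2*i)) 2)
    ([] : List Int) ([] : List Int)
  simp only [List.nil_append] at hc ⊢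
  exact hc

theorem pvBody_D (p : List Int × Int) : pvABody "D" p = pvBBody "D" p := by
  obtain ⟨rows, a⟩ := p
  unfold pvABody pvBBody
  simp only [String.reduceEq, or_false, or_true, if_true, if_false, pvPairvals]
  have hfilt : (PySem.List.pyRange 0 a 1).filter
      (fun i => decide (pvGet rows (2*i+1) > pvGet rows (2*i+2) ∧ pvGet rows (2*i+2) ≥ 0))
      = (PySem.List.pyRange 0 a 1).filter
        (fun i => decide (pvGet (PySem.List.slice rows (some 1) none) (2*i) > pvGet (PySem.List.slice rows (some 1) none) (2*i+1) ∧ pvGet (PySem.List.slice rows (some 1) none) (2*i+1) ≥ 0)) := by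
    apply List.filter_congr
    intro i hi
    have hi0 : 0 ≤ i := (PySem.List.mem_pyRange_one.mp hi).1
    rw [pvGet_tail rows (2*i) (by omega), pvGet_tail rows (2*i+1) (by omega)]
    have e1 : 2*i + 1 + 1 = 2*i + 2 := by ring
    rw [e1]
  rw [hfilt]
  have hfA : ∀ P : List Int,
      (fun (acc : List Int × List Int) i =>
        if i ∈ P then (acc.1 ++ [PySem.Int.floordiv (pvGet (PySem.List.slice rows (some 1) none) (2*i) + 1) 2], acc.2 ++ [PySem.Int.floordiv (pvGet (PySem.List.slice rows (some 1) none) (2*i+1) - 1) 2])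
        else (acc.1 ++ [PySem.Int.floordiv (pvGet (PySem.List.slice rows (some 1) none) (2*i+1) + 1) 2], acc.2 ++ [PySem.Int.floordiv (pvGet (PySem.List.slice rows (some 1) none) (2*i) - 1) 2]))
      = fun acc i =>
          (acc.1 ++ [if i ∈ P then PySem.Int.floordiv (pvGet (PySem.List.slice rows (some 1) none) (2*i) + 1) 2 else PySem.Int.floordiv (pvGet (PySem.List.slice rows (some 1) none) (2*i+1) + 1) 2],
           acc.2 ++ [if i ∈ P then PySem.Int.floordiv (pvGet (PySem.List.slice rows (some 1) none) (2*i+1) - 1) 2 else PySem.Int.floordiv (pvGet (PySem.List.slice rows (some 1) none) (2*i) - 1) 2]) := by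
    intro P; funext acc i; by_cases h : i ∈ P <;> simp [h]
  simp only [hfA, pvFoldl_pair_append]
  have hfB :
      (fun (acc : List (Int × Int × Int × Int × Int) × List Int × List Int) i =>
        if pvGet (PySem.List.slice rows (some 1) none) (2*i) > pvGet (PySem.List.slice rows (some 1) none) (2*i+1) ∧ pvGet (PySem.List.slice rows (some 1) none) (2*i+1) ≥ 0 then
          (acc.1 ++ [(i, PySem.Int.floordiv (pvGet (PySem.List.slice rows (some 1) none) (2*i+1) + 1) 2, PySem.Int.floordiv (pvGet (PySem.List.slice rows (some 1) none) (2*i) - 1) 2, PySem.Int.floordiv (pvGet (PySem.List.slice rows (some 1) none) (2*i) + 1) 2, PySem.Int.floordiv (pvGet (PySem.List.slice rows (some 1) none) (2*i+1) - 1) 2)], acc.2.1, acc.2.2)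
        else
          (acc.1, acc.2.1 ++ [PySem.Int.floordiv (pvGet (PySem.List.slice rows (some 1) none) (2*i+1) + 1) 2], acc.2.2 ++ [PySem.Int.floordiv (pvGet (PySem.List.slice rows (some 1) none) (2*i) - 1) 2]))
      = fun acc i =>
        if (fun i => decide (pvGet (PySem.List.slice rows (some 1) none) (2*i) > pvGet (PySem.List.slice rows (some 1) none) (2*i+1) ∧ pvGet (PySem.List.slice rows (some 1) none) (2*i+1) ≥ 0)) i then
          (acc.1 ++ [pvTup (fun i => PySem.Int.floordiv (pvGet (PySem.List.slice rows (some 1) none) (2*i+1) + 1) 2) (fun i => PySem.Int.floordiv (pvGet (PySem.List.slice rows (some 1) none) (2*i) - 1) 2) (fun i => PySem.Int.floordiv (pvGet (PySem.List.slice rows (some 1) none) (2*i) + 1) 2) (fun i => PySem.Int.floordiv (pvGet (PySem.List.slice rows (some 1) none) (2*i+1) - 1) 2) i],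
           acc.2.1, acc.2.2)
        else
          (acc.1, acc.2.1 ++ [PySem.Int.floordiv (pvGet (PySem.List.slice rows (some 1) none) (2*i+1) + 1) 2], acc.2.2 ++ [PySem.Int.floordiv (pvGet (PySem.List.slice rows (some 1) none) (2*i) - 1) 2]) := by
    funext acc i
    by_cases h : pvGet (PySem.List.slice rows (some 1) none) (2*i) > pvGet (PySem.List.slice rows (some 1) none) (2*i+1) ∧ pvGet (PySem.List.slice rows (some 1) none) (2*i+1) ≥ 0 <;>
      simp [h, pvTup]
  rw [hfB]
  rw [pvFoldl_triple_append]
  have hc := pvCore (PySem.List.pyRange 0 a 1) (PySem.List.nodup_pyRange_one 0 a)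
    (fun i => decide (pvGet (PySem.List.slice rows (some 1) none) (2*i) > pvGet (PySem.List.slice rows (some 1) none) (2*i+1) ∧ pvGet (PySem.List.slice rows (some 1) none) (2*i+1) ≥ 0))
    (fun i => PySem.Int.floordiv (pvGet (PySem.List.slice rows (some 1) none) (2*i+1) + 1) 2) (fun i => PySem.Int.floordiv (pvGet (PySem.List.slice rows (some 1) none) (2*i) - 1) 2) (fun i => PySem.Int.floordiv (pvGet (PySem.List.slice rows (some 1) none) (2*i) + 1) 2) (fun i => PySem.Int.floordiv (pvGet (PySem.List.slice rows (some 1) none) (2*i+1) - 1) 2)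
    [PySem.Int.floordiv (pvGet rows 0 + 1) 2] ([] : List Int)
  simp only [List.nil_append] at hc ⊢
  exact hc

theorem pvBody_C (p : List Int × Int) : pvABody "C" p = pvBBody "C" p := by
  obtain ⟨rows, a⟩ := p
  unfold pvABody pvBBody
  simp only [String.reduceEq, or_false, or_true, if_true, if_false, pvPairvals]
  have hfA : ∀ P : List Int,
      (fun (acc : List Int × List Int) i =>
        if i ∈ P then (acc.1 ++ [PySem.Int.floordiv (pvGet rows (2*i) + 1) 2], acc.2 ++ [PySem.Int.floordiv (pvGet rows (2*i+1) - 1) 2])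
        else (acc.1 ++ [PySem.Int.floordiv (pvGet rows (2*i+1) + 1) 2], acc.2 ++ [PySem.Int.floordiv (pvGet rows (2*i) - 1) 2]))
      = fun acc i =>
          (acc.1 ++ [if i ∈ P then PySem.Int.floordiv (pvGet rows (2*i) + 1) 2 else PySem.Int.floordiv (pvGet rows (2*i+1) + 1) 2],
           acc.2 ++ [if i ∈ P then PySem.Int.floordiv (pvGet rows (2*i+1) - 1) 2 else PySem.Int.floordiv (pvGet rows (2*i) - 1) 2]) := by
    intro P; funext acc i; by_cases h : i ∈ P <;> simp [h]
  simp only [hfA, pvFoldl_pair_append]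
  have hfB :
      (fun (acc : List (Int × Int × Int × Int × Int) × List Int × List Int) i =>
        if pvGet (rows) (2*i) > pvGet (rows) (2*i+1) ∧ pvGet (rows) (2*i+1) ≥ 0 then
          (acc.1 ++ [(i, PySem.Int.floordiv (pvGet rows (2*i+1) + 1) 2, PySem.Int.floordiv (pvGet rows (2*i) - 1) 2, PySem.Int.floordiv (pvGet rows (2*i) + 1) 2, PySem.Int.floordiv (pvGet rows (2*i+1) - 1) 2)], acc.2.1, acc.2.2)
        else
          (acc.1, acc.2.1 ++ [PySem.Int.floordiv (pvGet rows (2*i+1) + 1) 2], acc.2.2 ++ [PySem.Int.floordiv (pvGet rows (2*i) - 1) 2]))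
      = fun acc i =>
        if (fun i => decide (pvGet rows (2*i) > pvGet rows (2*i+1) ∧ pvGet rows (2*i+1) ≥ 0)) i then
          (acc.1 ++ [pvTup (fun i => PySem.Int.floordiv (pvGet rows (2*i+1) + 1) 2) (fun i => PySem.Int.floordiv (pvGet rows (2*i) - 1) 2) (fun i => PySem.Int.floordiv (pvGet rows (2*i) + 1) 2) (fun i => PySem.Int.floordiv (pvGet rows (2*i+1) - 1) 2) i],
           acc.2.1, acc.2.2)
        else
          (acc.1, acc.2.1 ++ [PySem.Int.floordiv (pvGet rows (2*i+1) + 1) 2], acc.2.2 ++ [PySem.Int.floordiv (pvGet rows (2*i) - 1) 2]) := by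
    funext acc i
    by_cases h : pvGet (rows) (2*i) > pvGet (rows) (2*i+1) ∧ pvGet (rows) (2*i+1) ≥ 0 <;>
      simp [h, pvTup]
  rw [hfB]
  rw [pvFoldl_triple_append]
  have hc := pvCore (PySem.List.pyRange 0 a 1) (PySem.List.nodup_pyRange_one 0 a)
    (fun i => decide (pvGet rows (2*i) > pvGet rows (2*i+1) ∧ pvGet rows (2*i+1) ≥ 0))
    (fun i => PySem.Int.floordiv (pvGet rows (2*i+1) + 1) 2) (fun i => PySem.Int.floordiv (pvGet rows (2*i) - 1) 2) (fun i => PySem.Int.floordiv (pvGet rows (2*i) + 1) 2) (fun i => PySem.Int.floordiv (pvGet rows (2*i+1) - 1) 2)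
    ([] : List Int) ([] : List Int)
  simp only [List.nil_append] at hc ⊢
  exact hc

theorem pvBody_other (rtype : String) (hB : rtype ≠ "B") (hC : rtype ≠ "C")
    (hD : rtype ≠ "D") (hM : rtype ≠ "M") (p : List Int × Int) :
    pvABody rtype p = pvBBody rtype p := by
  unfold pvABody pvBBody
  simp [hB, hC, hD, hM]

theorem mainEq (dpart : List Int) (rtype : String) :
    dpart2Wrepns_with_wp dpart rtype = dpart2Wrepns_with_wp_alt dpart rtype := by
  have hm : PySem.Int.mod ((pvSrt dpart).length : Int) 2 = (((pvSrt dpart).length % 2 : Nat) : Int) := by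
    exact_mod_cast PySem.Int.mod_natCast (pvSrt dpart).length 2
  rw [pvA_split, pvB_split, pvSt_eq rtype (pvSrt dpart) _ _ (by
    rw [hm]
    rcases Nat.mod_two_eq_zero_or_one ((pvSrt dpart).length) with h | h <;> simp [h])]
  by_cases hB : rtype = "B"
  · rw [hB]; exact pvBody_B _
  by_cases hM : rtype = "M"
  · rw [hM]; exact pvBody_M _
  by_cases hC : rtype = "C"
  · rw [hC]; exact pvBody_C _
  by_cases hD : rtype = "D"
  · rw [hD]; exact pvBody_D _
  exact pvBody_other rtype hB hC hD hM _

-- ===== VERDICT (by name: the statement is the Claim_ definition above) =====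
theorem dpart2Wrepns_with_wp_spec : Claim_equal_dpart2Wrepns_with_wp := by
  intro dpart rtype _
  unfold Spec_dpart2Wrepns_with_wp
  exact mainEq dpart rtype
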